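-- pv_equiv track=rewrite | github.com/miczho/competitive-coding | src/codejam-21-1c-2.py | roaringYears
-- ===== SOURCE A (Python) =====
-- def roaringYears(y):
--     n = len(str(y))
--     ans = float('inf')
--
--     def findNum(val, sections):
--         res = []
--         for _ in range(sections):
--             res.append(str(val))
--             val += 1
--         return int(''.join(res))
--
--     # why n+2?
--     for i in range(2, n+2):
--         l = 0
--         r = 10 ** (n // i)
--         while l + 1 < r:
--             m = l + (r - l) // 2
--             if findNum(m, i) > y:
--                 r = m
--             else:
--                 l = m
--
--         ans = min(ans, findNum(r, i))
--
--     return ans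
-- ===== SOURCE B (Python) =====
-- def roaringYears(y):
--     n = len(str(y))
--     ans = None
--     for i in range(2, n + 2):
--         val = 1
--         while True:
--             num = 0
--             for k in range(i):
--                 t = val + k
--                 num = num * 10 ** len(str(t)) + t
--             if num > y:
--                 break
--             val += 1
--         ans = num if ans is None else min(ans, num)
--     return ans
-- ===== Notes on version B (the rewrite author's own statement) =====
-- stated objective: alternative
-- what changed: Per section-count i, the binary search over [0, 10**(n//i)] is replaced by a direct linear upward scan for the first starting value whose concatenation exceeds y, and the concatenated number is built arithmetically (num = num*10**len(str(t)) + t) instead of by string join + int().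
import Mathlib
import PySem

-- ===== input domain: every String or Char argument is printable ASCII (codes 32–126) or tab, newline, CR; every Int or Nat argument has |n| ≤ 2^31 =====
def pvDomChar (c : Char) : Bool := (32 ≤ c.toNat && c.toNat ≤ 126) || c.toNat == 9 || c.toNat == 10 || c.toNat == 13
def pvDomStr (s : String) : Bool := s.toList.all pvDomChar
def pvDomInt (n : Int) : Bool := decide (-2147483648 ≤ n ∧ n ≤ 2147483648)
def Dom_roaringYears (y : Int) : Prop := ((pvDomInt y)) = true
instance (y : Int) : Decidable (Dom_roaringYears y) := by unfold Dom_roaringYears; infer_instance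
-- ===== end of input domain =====

-- B replaces A's per-i binary search by a linear upward scan for the first starting value whose
-- concatenation exceeds y, and builds the concatenated number arithmetically instead of via
-- string join + int(); same result, similar size, no speed claim (the scan is slower).

-- ===== PORT A =====

-- int(s): hand-ported decimal fold; exact here because every string findNum parses is a
-- nonempty concatenation of str(t) for t ≥ 0, i.e. pure decimal digits (no sign/space/underscore),
-- on which int() is exactly this most-significant-first fold.
def pvParseDigits (cs : List Char) : Int :=
  cs.foldl (fun acc c => 10 * acc + ((c.toNat : Int) - 48)) 0

-- A's nested findNum: res = []; for _ in range(sections): res.append(str(val)); val += 1;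
-- return int(''.join(res))
def pvFindNum (val : Int) (sections : Int) : Int :=
  let st := (PySem.List.pyRange 0 sections 1).foldl
      (fun (st : List String × Int) _ => (st.1 ++ [PySem.Int.toStr st.2], st.2 + 1)) ([], val)
  pvParseDigits (PySem.Str.join "" st.1).toList

-- A's while-loop: while l + 1 < r: m = l + (r - l) // 2; if findNum(m, i) > y: r = m else l = m
-- (the Nat fuel only makes the recursion structural: the gap r - l shrinks every iteration, so a
-- fuel of (r - l).toNat — what the caller passes — never runs out; see pvBinLoop_spec below)
def pvBinLoop (y i : Int) : Int → Int → Nat → Int × Int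
  | l, r, 0 => (l, r)
  | l, r, fuel + 1 =>
    if l + 1 < r then
      let m := l + PySem.Int.floordiv (r - l) 2
      if pvFindNum m i > y then pvBinLoop y i l m fuel else pvBinLoop y i m r fuel
    else (l, r)

def roaringYears (y : Int) : Int :=
  let n : Int := PySem.Str.len (PySem.Int.toStr y)
  -- ans = float('inf') is modeled as `none`: min(inf, x) = x on the first iteration
  let ans : Option Int :=
    (PySem.List.pyRange 2 (n + 2) 1).foldl
      (fun ans i =>
        -- r = 10 ** (n // i); the exponent is ≥ 0 here (n ≥ 1, i ≥ 2), so ^ on a Nat exponent is exact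
        let r := (pvBinLoop y i 0 (10 ^ (PySem.Int.floordiv n i).toNat)
                    (((10:Int) ^ (PySem.Int.floordiv n i).toNat - 0).toNat)).2
        some (match ans with
              | none => pvFindNum r i
              | some a => min a (pvFindNum r i))) none
  -- the range is nonempty (n ≥ 1), so ans is always some; 0 is an unreachable default
  match ans with
  | some a => a
  | none => 0

-- ===== PORT B =====

-- num = 0; for k in range(i): t = val + k; num = num * 10 ** len(str(t)) + t
def pvConcatNum (val : Int) (i : Int) : Int :=
  (PySem.List.pyRange 0 i 1).foldl
    (fun num k =>
      num * 10 ^ (PySem.Str.len (PySem.Int.toStr (val + k))).toNat + (val + k)) 0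

-- B's `while True` scan; the fuel only makes the recursion total — it never runs out on the
-- calls roaringYears_alt makes (the scan stops at some val ≤ max(y,0)+1, see pvScan_spec below)
def pvScan (y i : Int) : Int → Nat → Int
  | val, 0 => pvConcatNum val i
  | val, fuel + 1 =>
      let num := pvConcatNum val i
      if num > y then num else pvScan y i (val + 1) fuel

def roaringYears_alt (y : Int) : Int :=
  let n : Int := PySem.Str.len (PySem.Int.toStr y)
  let ans : Option Int :=
    (PySem.List.pyRange 2 (n + 2) 1).foldl
      (fun ans i =>
        let num := pvScan y i 1 (y.toNat + 1)
        some (match ans with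
              | none => num
              | some a => min a num)) none
  match ans with
  | some a => a
  | none => 0

-- ===== PRECONDITION & SPEC =====
def Spec_roaringYears (y : Int) (out : Int) : Prop := out = roaringYears_alt y
instance (y : Int) (out : Int) : Decidable (Spec_roaringYears y out) := by unfold Spec_roaringYears; infer_instance

-- ===== CLAIM (what is proved, stated in full; the proofs are below) =====
def Claim_equal_roaringYears : Prop := ∀ (y : Int), Dom_roaringYears y → Spec_roaringYears y (roaringYears y)

-- ===== LEMMAS AND PROOFS =====

-- specification-side decimal digits of a Nat, most significant first
def pvD (n : Nat) : List Char :=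
  if n < 10 then [Nat.digitChar n] else pvD (n / 10) ++ [Nat.digitChar (n % 10)]
decreasing_by exact Nat.div_lt_self (by omega) (by omega)

-- the numeric value of the i-section concatenation starting at v
def pvC (v : Nat) : Nat → Nat
  | 0 => 0
  | m + 1 => pvC v m * 10 ^ (pvD (v + m)).length + (v + m)

theorem pvToDigitsCore_eq (f : Nat) : ∀ (n : Nat) (acc : List Char), n < f →
    Nat.toDigitsCore 10 f n acc = pvD n ++ acc := by
  induction f with
  | zero => intro n acc h; omega
  | succ f ih =>
    intro n acc h
    rw [Nat.toDigitsCore]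
    by_cases h10 : n < 10
    · have hz : n / 10 = 0 := Nat.div_eq_of_lt h10
      rw [if_pos hz]
      conv_rhs => rw [pvD, if_pos h10]
      rw [Nat.mod_eq_of_lt h10]
      rfl
    · have hz : ¬ n / 10 = 0 := by omega
      rw [if_neg hz, ih (n / 10) _ (by omega)]
      conv_rhs => rw [pvD, if_neg h10]
      simp

theorem pvToChars_nonneg (t : Int) (h : 0 ≤ t) : PySem.Int.toChars t = pvD t.toNat := by
  rw [PySem.Int.toChars, if_neg (by omega), Nat.toDigits,
    pvToDigitsCore_eq _ _ _ (Nat.lt_succ_self _), List.append_nil]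


theorem pvParse_foldl (ys : List Char) : ∀ (a : Int),
    ys.foldl (fun acc c => 10 * acc + ((c.toNat : Int) - 48)) a
      = a * 10 ^ ys.length + pvParseDigits ys := by
  induction ys with
  | nil => intro a; simp [pvParseDigits]
  | cons c ys ih =>
    intro a
    simp only [List.foldl_cons, List.length_cons, pvParseDigits]
    rw [ih, ih (10 * 0 + _)]
    ring


theorem pvParse_append (xs ys : List Char) :
    pvParseDigits (xs ++ ys) = pvParseDigits xs * 10 ^ ys.length + pvParseDigits ys := by
  unfold pvParseDigits
  rw [List.foldl_append, pvParse_foldl]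
  rfl


theorem pvParse_pvD (n : Nat) : pvParseDigits (pvD n) = n := by
  induction n using Nat.strong_induction_on with
  | _ n ih =>
    by_cases h10 : n < 10
    · rw [pvD, if_pos h10]
      interval_cases n <;> decide
    · rw [pvD, if_neg h10, pvParse_append, ih (n / 10) (Nat.div_lt_self (by omega) (by omega))]
      have h1 : pvParseDigits [Nat.digitChar (n % 10)] = (n % 10 : Nat) := by
        have : n % 10 < 10 := Nat.mod_lt _ (by omega)
        set r := n % 10
        interval_cases r <;> decide
      rw [h1]
      simp only [List.length_singleton, pow_one]
      omega


theorem pvD_len_pos (n : Nat) : 1 ≤ (pvD n).length := by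
  rw [pvD]
  split
  · simp
  · simp


theorem pvD_len_bounds (n : Nat) (h : 1 ≤ n) :
    10 ^ ((pvD n).length - 1) ≤ n ∧ n < 10 ^ (pvD n).length := by
  induction n using Nat.strong_induction_on with
  | _ n ih =>
    by_cases h10 : n < 10
    · rw [pvD, if_pos h10]; simpa using ⟨h, h10⟩
    · rw [pvD, if_neg h10]
      have hd : 1 ≤ n / 10 := by omega
      obtain ⟨lo, hi⟩ := ih (n / 10) (Nat.div_lt_self (by omega) (by omega)) hd
      have hlen : 1 ≤ (pvD (n / 10)).length := pvD_len_pos _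
      constructor
      · simp only [List.length_append, List.length_singleton]
        have : 10 ^ ((pvD (n / 10)).length + 1 - 1) = 10 ^ ((pvD (n / 10)).length - 1) * 10 := by
          rw [Nat.add_sub_cancel, ← pow_succ]
          congr 1
          omega
        rw [this]
        calc 10 ^ ((pvD (n / 10)).length - 1) * 10 ≤ (n / 10) * 10 := by
              exact Nat.mul_le_mul_right _ lo
          _ ≤ n := by omega
      · simp only [List.length_append, List.length_singleton]
        rw [pow_succ]
        have : n < (n / 10 + 1) * 10 := by omega
        calc n < (n / 10 + 1) * 10 := this
          _ ≤ 10 ^ (pvD (n / 10)).length * 10 := Nat.mul_le_mul_right _ (by omega)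


theorem pvD_len_mono {n m : Nat} (h : n ≤ m) : (pvD n).length ≤ (pvD m).length := by
  by_cases hn : 1 ≤ n
  · obtain ⟨lo, _⟩ := pvD_len_bounds n hn
    obtain ⟨_, hi⟩ := pvD_len_bounds m (hn.trans h)
    have : 10 ^ ((pvD n).length - 1) < 10 ^ (pvD m).length := lo.trans_lt (h.trans_lt hi |>.trans_le (le_refl _)) |>.trans_le (le_refl _)
    have := (Nat.pow_lt_pow_iff_right (by omega : 1 < 10)).mp (lo.trans_lt (lt_of_le_of_lt h hi))
    have hp := pvD_len_pos n
    omega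
  · have : n = 0 := by omega
    subst this
    have : (pvD 0).length = 1 := by rw [pvD]; simp
    rw [this]; exact pvD_len_pos m


theorem pvD_len_pow (j : Nat) : (pvD (10 ^ j)).length = j + 1 := by
  obtain ⟨lo, hi⟩ := pvD_len_bounds (10 ^ j) (Nat.one_le_pow _ _ (by omega))
  have h1 := (Nat.pow_lt_pow_iff_right (by omega : 1 < 10)).mp hi
  have h2 := (Nat.pow_le_pow_iff_right (by omega : 1 < 10)).mp lo
  have hp := pvD_len_pos (10 ^ j)
  omega


theorem pvLenStr (t : Int) (h : 0 ≤ t) :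
    (PySem.Str.len (PySem.Int.toStr t)).toNat = (pvD t.toNat).length := by
  rw [PySem.Str.len_eq, PySem.Int.toList_toStr, pvToChars_nonneg t h]
  simp


theorem pvJoin_nil_flatten (l : List (List Char)) : PySem.Chars.join [] l = l.flatten := by
  induction l with
  | nil => rfl
  | cons a l ih =>
    cases l with
    | nil => simp [PySem.Chars.join, List.intercalate]
    | cons b r =>
      rw [PySem.Chars.join_cons_cons] at *
      simp_all [PySem.Chars.join]


theorem pvConcat_core (m : Nat) (val : Int) (h : 0 ≤ val) :
    (List.range m).foldl
      (fun (num : Int) (k : Nat) =>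
        num * 10 ^ (PySem.Str.len (PySem.Int.toStr (val + (0 + (k : Int))))).toNat + (val + (0 + (k : Int)))) 0
      = (pvC val.toNat m : Int) := by
  induction m with
  | zero => simp [pvC]
  | succ m ih =>
    rw [List.range_succ, List.foldl_append, ih]
    simp only [List.foldl_cons, List.foldl_nil, pvC]
    rw [pvLenStr (val + (0 + (m : Int))) (by omega)]
    have h1 : (val + (0 + (m : Int))).toNat = val.toNat + m := by omega
    rw [h1]
    have h2 : ((val.toNat : Int)) = val := by omega
    push_cast
    rw [h2]
    ring


theorem pvConcatNum_eq (val i : Int) (h : 0 ≤ val) :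
    pvConcatNum val i = (pvC val.toNat i.toNat : Int) := by
  unfold pvConcatNum
  rw [PySem.List.pyRange_one, List.foldl_map]
  have := pvConcat_core i.toNat val h
  simpa using this


theorem pvFind_state {α : Type} (l : List α) : ∀ (acc : List String) (val : Int),
    l.foldl (fun (st : List String × Int) _ => (st.1 ++ [PySem.Int.toStr st.2], st.2 + 1)) (acc, val)
      = (acc ++ (List.range l.length).map (fun (k : Nat) => PySem.Int.toStr (val + (k : Int))), val + l.length) := by
  induction l with
  | nil => intro acc val; simp
  | cons a l ih =>
    intro acc val
    simp only [List.foldl_cons, List.length_cons, ih]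
    simp only [Prod.mk.injEq]
    refine ⟨?_, by push_cast; ring⟩
    rw [List.range_succ_eq_map]
    simp only [List.map_cons, List.map_map, List.append_assoc, List.singleton_append]
    congr 2
    · simp
    · apply List.map_congr_left
      intro k _
      simp only [Function.comp]
      congr 1
      push_cast
      ring


theorem pvParse_concat (m : Nat) (val : Int) (h : 0 ≤ val) :
    pvParseDigits (((List.range m).map (fun (k : Nat) => PySem.Int.toChars (val + (k : Int)))).flatten)
      = (pvC val.toNat m : Int) := by
  induction m with
  | zero => simp [pvParseDigits, pvC]
  | succ m ih =>
    rw [List.range_succ, List.map_append, List.flatten_append, pvParse_append, ih]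
    simp only [List.map_cons, List.map_nil, List.flatten_cons, List.flatten_nil, List.append_nil]
    rw [pvToChars_nonneg (val + m) (by omega), pvParse_pvD]
    have h1 : (val + (m : Int)).toNat = val.toNat + m := by omega
    rw [h1]
    simp only [pvC]
    push_cast
    ring


theorem pvFindNum_eq (val i : Int) (h : 0 ≤ val) :
    pvFindNum val i = (pvC val.toNat i.toNat : Int) := by
  unfold pvFindNum
  rw [pvFind_state]
  simp only [List.nil_append]
  rw [PySem.Str.toList_join, show ("" : String).toList = ([] : List Char) from rfl,
    pvJoin_nil_flatten]
  have hlen : (PySem.List.pyRange 0 i 1).length = i.toNat := by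
    rw [PySem.List.length_pyRange_one]; simp
  rw [hlen]
  have hmap : (List.map String.toList ((List.range i.toNat).map (fun (k : Nat) => PySem.Int.toStr (val + (k : Int)))))
      = (List.range i.toNat).map (fun (k : Nat) => PySem.Int.toChars (val + (k : Int))) := by
    rw [List.map_map]
    congr 1
    funext k
    simp [PySem.Int.toList_toStr]
  rw [hmap]
  exact pvParse_concat i.toNat val h


theorem pvC_ge (v : Nat) (m : Nat) (hm : 1 ≤ m) : v ≤ pvC v m := by
  induction m with
  | zero => omega
  | succ m ih =>
    by_cases h : 1 ≤ m
    · have := ih h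
      simp only [pvC]
      nlinarith [pow_pos (by omega : 0 < 10) (pvD (v + m)).length]
    · have : m = 0 := by omega
      subst this
      simp [pvC]


theorem pvC_strict (v : Nat) (m : Nat) (hm : 1 ≤ m) (hv : 1 ≤ v) :
    pvC v m < pvC (v + 1) m := by
  induction m with
  | zero => omega
  | succ m ih =>
    by_cases h : 1 ≤ m
    · have ihm := ih h
      simp only [pvC]
      have hlen : (pvD (v + m)).length ≤ (pvD (v + 1 + m)).length := pvD_len_mono (by omega)
      have hC1 : 1 ≤ pvC (v + 1) m := le_trans (by omega) (pvC_ge (v + 1) m h)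
      have hpow : (10:Nat) ^ (pvD (v + m)).length ≤ 10 ^ (pvD (v + 1 + m)).length :=
        Nat.pow_le_pow_right (by omega) hlen
      have h1 : pvC v m * 10 ^ (pvD (v + m)).length + 10 ^ (pvD (v + m)).length
          ≤ pvC (v + 1) m * 10 ^ (pvD (v + 1 + m)).length := by
        calc pvC v m * 10 ^ (pvD (v + m)).length + 10 ^ (pvD (v + m)).length
            = (pvC v m + 1) * 10 ^ (pvD (v + m)).length := by ring
          _ ≤ pvC (v + 1) m * 10 ^ (pvD (v + m)).length := Nat.mul_le_mul_right _ (by omega)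
          _ ≤ pvC (v + 1) m * 10 ^ (pvD (v + 1 + m)).length := Nat.mul_le_mul_left _ hpow
      have hp : 1 ≤ (10:Nat) ^ (pvD (v + m)).length := Nat.one_le_pow _ _ (by omega)
      omega
    · have : m = 0 := by omega
      subst this
      simp [pvC]


theorem pvC_mono {v w : Nat} (m : Nat) (h : v ≤ w) (hv : 1 ≤ v) : pvC v m ≤ pvC w m := by
  by_cases hm : 1 ≤ m
  · induction w with
    | zero => omega
    | succ w ihw =>
      by_cases hw : v ≤ w
      · exact le_trans (ihw hw) (le_of_lt (pvC_strict w m hm (by omega)))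
      · have : v = w + 1 := by omega
        subst this; exact le_refl _
  · have : m = 0 := by omega
    subst this; simp [pvC]


theorem pvC_pow_big (j w : Nat) :
    10 ^ ((w + 1) * j + w) ≤ pvC (10 ^ j) (w + 1) := by
  induction w with
  | zero => simp [pvC]
  | succ w ih =>
    have hstep : pvC (10 ^ j) (w + 2) = pvC (10 ^ j) (w + 1) * 10 ^ (pvD (10 ^ j + (w + 1))).length + (10 ^ j + (w + 1)) := rfl
    rw [hstep]
    have hlen : j + 1 ≤ (pvD (10 ^ j + (w + 1))).length :=
      le_trans (le_of_eq (pvD_len_pow j).symm) (pvD_len_mono (by omega))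
    have hexp : (w + 2) * j + (w + 1) = ((w + 1) * j + w) + (j + 1) := by ring
    calc (10:Nat) ^ ((w + 2) * j + (w + 1))
        = 10 ^ ((w + 1) * j + w) * 10 ^ (j + 1) := by rw [hexp, pow_add]
      _ ≤ pvC (10 ^ j) (w + 1) * 10 ^ (pvD (10 ^ j + (w + 1))).length :=
          Nat.mul_le_mul ih (Nat.pow_le_pow_right (by omega) hlen)
      _ ≤ pvC (10 ^ j) (w + 1) * 10 ^ (pvD (10 ^ j + (w + 1))).length + (10 ^ j + (w + 1)) :=
          Nat.le_add_right _ _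


-- P y i v: the i-section concatenation starting at v beats y
def pvP (y : Int) (i : Int) (v : Nat) : Prop := y < (pvC v i.toNat : Int)

theorem pvP_exists (y i : Int) (hi : 1 ≤ i) : pvP y i (y.toNat + 1) := by
  unfold pvP
  have h1 : (y.toNat + 1 : Nat) ≤ pvC (y.toNat + 1) i.toNat :=
    pvC_ge _ _ (by omega)
  have : (y.toNat : Int) + 1 ≤ (pvC (y.toNat + 1) i.toNat : Int) := by exact_mod_cast h1
  omega


theorem pvP_mono (y i : Int) {v w : Nat} (h : v ≤ w) (hv : 1 ≤ v)
    (hP : pvP y i v) : pvP y i w := by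
  unfold pvP at *
  have := pvC_mono (w := w) i.toNat h hv
  omega


theorem pvP_top (y i : Int) (hi : 2 ≤ i) :
    pvP y i ((10:Int) ^ (PySem.Int.floordiv (PySem.Str.len (PySem.Int.toStr y)) i).toNat).toNat := by
  set e := (PySem.Int.floordiv (PySem.Str.len (PySem.Int.toStr y)) i).toNat with he
  have hpow : ((10:Int) ^ e).toNat = 10 ^ e := by
    rw [show ((10:Int) ^ e) = ((10 ^ e : Nat) : Int) by push_cast; ring, Int.toNat_natCast]
  rw [hpow]
  by_cases hy : 1 ≤ y
  · have hyn : 1 ≤ y.toNat := by omega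
    obtain ⟨lo, hiL⟩ := pvD_len_bounds y.toNat hyn
    set L : Nat := (pvD y.toNat).length with hL
    have hlen : PySem.Str.len (PySem.Int.toStr y) = (L : Int) := by
      rw [PySem.Str.len_eq, PySem.Int.toList_toStr, pvToChars_nonneg y (by omega)]
    have hLpos : 1 ≤ L := by
      by_contra hc
      simp only [not_le, Nat.lt_one_iff] at hc
      rw [hc, pow_zero] at hiL
      omega
    set c : Nat := i.toNat with hcdef
    have hc2 : 2 ≤ c := by omega
    have heL : e = L / c := by
      rw [he, hlen, PySem.Int.floordiv_eq_ediv_of_pos (by omega : (0:Int) < i)]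
      rw [show (i : Int) = ((c : Nat) : Int) by omega, ← Int.natCast_div, Int.toNat_natCast]
    have hbig := pvC_pow_big e (c - 1)
    have hcc : c - 1 + 1 = c := by omega
    rw [hcc] at hbig
    have hexp : L ≤ c * e + (c - 1) := by
      rw [heL]
      have := Nat.div_add_mod L c
      have hmod : L % c < c := Nat.mod_lt _ (by omega)
      omega
    have h10 : (10:Nat) ^ L ≤ 10 ^ (c * e + (c - 1)) := Nat.pow_le_pow_right (by omega) hexp
    unfold pvP
    have hfin : y.toNat < pvC (10 ^ e) c := by omega
    rw [show y = ((y.toNat : Nat) : Int) by omega]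
    exact_mod_cast lt_of_lt_of_le hfin (le_refl _)
  · unfold pvP
    have h1 : (1:Nat) ≤ 10 ^ e := Nat.one_le_pow _ _ (by omega)
    have h2 : (10:Nat) ^ e ≤ pvC (10 ^ e) i.toNat := pvC_ge _ _ (by omega)
    have : (1:Int) ≤ (pvC (10 ^ e) i.toNat : Int) := by exact_mod_cast le_trans h1 h2
    omega


theorem pvBinLoop_spec (y i : Int) :
    ∀ (fuel : Nat) (l r : Int), (r - l).toNat ≤ fuel → 0 ≤ l → l < r → pvP y i r.toNat →
    (∀ v : Nat, 1 ≤ v → (v : Int) ≤ l → ¬ pvP y i v) →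
    1 ≤ (pvBinLoop y i l r fuel).2 ∧ pvP y i ((pvBinLoop y i l r fuel).2).toNat ∧
      ∀ v : Nat, 1 ≤ v → (v : Int) < (pvBinLoop y i l r fuel).2 → ¬ pvP y i v := by
  intro fuel
  induction fuel with
  | zero => intro l r hk hl hlr hPr hNl; omega
  | succ fuel ih =>
    intro l r hk hl hlr hPr hNl
    rw [pvBinLoop]
    by_cases h : l + 1 < r
    · rw [if_pos h]
      have hdiv : PySem.Int.floordiv (r - l) 2 = (r - l) / 2 :=
        PySem.Int.floordiv_eq_ediv_of_pos (by omega)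
      set m := l + PySem.Int.floordiv (r - l) 2 with hm
      have hm1 : l < m := by rw [hm, hdiv]; omega
      have hm2 : m < r := by rw [hm, hdiv]; omega
      have hm0 : 0 ≤ m := by omega
      by_cases hcmp : pvFindNum m i > y
      · rw [if_pos hcmp]
        have hPm : pvP y i m.toNat := by
          unfold pvP
          rw [pvFindNum_eq m i hm0] at hcmp
          omega
        exact ih l m (by omega) hl hm1 hPm hNl
      · rw [if_neg hcmp]
        have hNm : ¬ pvP y i m.toNat := by
          unfold pvP
          rw [pvFindNum_eq m i hm0] at hcmp
          omega
        have hNl' : ∀ v : Nat, 1 ≤ v → (v : Int) ≤ m → ¬ pvP y i v := by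
          intro v hv hvm hPv
          exact hNm (pvP_mono y i (by omega : v ≤ m.toNat) hv hPv)
        exact ih m r (by omega) hm0 hm2 hPr hNl'
    · rw [if_neg h]
      have hr : r = l + 1 := by omega
      refine ⟨by omega, hPr, ?_⟩
      intro v hv hvr
      exact hNl v hv (by omega)

theorem pvScan_spec (y i : Int) (vstar : Nat) (hP : pvP y i vstar)
    (hmin : ∀ w : Nat, 1 ≤ w → w < vstar → ¬ pvP y i w) :
    ∀ (fuel : Nat) (val : Int), 1 ≤ val → (val : Int) ≤ (vstar : Int) →
    (vstar : Int) < val + fuel →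
    pvScan y i val fuel = (pvC vstar i.toNat : Int) := by
  intro fuel
  induction fuel with
  | zero => intro val h1v h2v h3v; omega
  | succ fuel ihf =>
    intro val h1v h2v h3v
    rw [pvScan]
    by_cases hcmp : pvConcatNum val i > y
    · rw [if_pos hcmp]
      have hPv : pvP y i val.toNat := by
        unfold pvP
        rw [pvConcatNum_eq val i (by omega)] at hcmp
        omega
      have : val = (vstar : Int) := by
        by_contra hc
        have hlt : val < (vstar : Int) := by omega
        exact hmin val.toNat (by omega) (by omega) hPv
      rw [pvConcatNum_eq val i (by omega), this]
      simp
    · rw [if_neg hcmp]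
      have hNv : ¬ pvP y i val.toNat := by
        unfold pvP
        rw [pvConcatNum_eq val i (by omega)] at hcmp
        omega
      have hne : val ≠ (vstar : Int) := by
        intro hc
        apply hNv
        rw [hc]
        simpa using hP
      exact ihf (val + 1) (by omega) (by omega) (by omega)


theorem pvBody_eq (y i : Int) (hi : 2 ≤ i) :
    pvFindNum (pvBinLoop y i 0 (10 ^ (PySem.Int.floordiv (PySem.Str.len (PySem.Int.toStr y)) i).toNat)
        (((10:Int) ^ (PySem.Int.floordiv (PySem.Str.len (PySem.Int.toStr y)) i).toNat - 0).toNat)).2 i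
      = pvScan y i 1 (y.toNat + 1) := by
  set R : Int := 10 ^ (PySem.Int.floordiv (PySem.Str.len (PySem.Int.toStr y)) i).toNat with hR
  have hRpos : 1 ≤ R := one_le_pow₀ (by omega)
  have hPR : pvP y i R.toNat := by
    have := pvP_top y i hi
    exact this
  obtain ⟨hr1, hrP, hrmin⟩ :=
    pvBinLoop_spec y i (R - 0).toNat 0 R (le_refl _) (by omega) (by omega) hPR
      (by intro v hv hvl; omega)
  set r' := (pvBinLoop y i 0 R (R - 0).toNat).2 with hr'
  have hub : (r'.toNat : Int) ≤ (y.toNat : Int) + 1 := by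
    by_contra hc
    have hP1 := pvP_exists y i (by omega)
    exact hrmin (y.toNat + 1) (by omega) (by push_cast; omega) hP1
  rw [pvScan_spec y i r'.toNat hrP
    (by intro w hw hwr; exact hrmin w hw (by omega))
    (y.toNat + 1) 1 (by omega) (by omega) (by omega)]
  exact pvFindNum_eq r' i (by omega)

-- ===== VERDICT (by name: the statement is the Claim_ definition above) =====
theorem roaringYears_spec : Claim_equal_roaringYears := by
  intro y _
  show roaringYears y = roaringYears_alt y
  have hfold :
      (PySem.List.pyRange 2 (PySem.Str.len (PySem.Int.toStr y) + 2) 1).foldl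
        (fun (ans : Option Int) i =>
          let r := (pvBinLoop y i 0 (10 ^ (PySem.Int.floordiv (PySem.Str.len (PySem.Int.toStr y)) i).toNat)
                      (((10:Int) ^ (PySem.Int.floordiv (PySem.Str.len (PySem.Int.toStr y)) i).toNat - 0).toNat)).2
          some (match ans with
                | none => pvFindNum r i
                | some a => min a (pvFindNum r i))) none
      = (PySem.List.pyRange 2 (PySem.Str.len (PySem.Int.toStr y) + 2) 1).foldl
        (fun (ans : Option Int) i =>
          let num := pvScan y i 1 (y.toNat + 1)
          some (match ans with
                | none => num
                | some a => min a num)) none := by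
    apply PySem.List.foldl_congr_mem
    intro acc x hx
    have hx2 : 2 ≤ x := (PySem.List.mem_pyRange_one.mp hx).1
    simp only []
    rw [pvBody_eq y x hx2]
  simp only [roaringYears, roaringYears_alt]
  rw [hfold]
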